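-- pv_equiv track=rewrite | github.com/tdaloglu/metu-projects | 111/the4/tester.py | inx_check
-- ===== SOURCE A (Python) =====
-- def inx_check(s1, s2):
--     if type(s1) != str or type(s2) != str:
--         return False
--     if len(s1) != len(s2):
--         return False
--     diff = 0
--     for i in range(len(s1)):
--         if (s1[i] != 'x' and s1[i] != 'o') or (s2[i] != 'x' and s2[i] != 'o'):
--             return False
--         if (s1[i] != s2[i]) and s1[i] == 'x':
--             diff += 1
--     return True if diff == 1 else False
-- ===== SOURCE B (Python) =====
-- def inx_check(s1, s2):
--     if type(s1) != str or type(s2) != str: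
--         return False
--     if len(s1) != len(s2):
--         return False
--     pairs = list(zip(s1, s2))
--     if any(a not in 'xo' or b not in 'xo' for a, b in pairs):
--         return False
--     # search for the first x->o move, then verify the rest contains none
--     for k, (a, b) in enumerate(pairs):
--         if a == 'x' and b == 'o':
--             return not any(c == 'x' and d == 'o' for c, d in pairs[k + 1:])
--     return False
-- ===== Notes on version B (the rewrite author's own statement) =====
-- stated objective: alternative
-- what changed: A makes one interleaved pass that validates characters while accumulating an integer counter of x->o positions and compares it to 1 at the end; B has no counter at all: it validates the zipped pairs up front, then searches for the first x->o move and answers by verifying the remaining suffix contains no further move (early exit).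
import Mathlib
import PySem

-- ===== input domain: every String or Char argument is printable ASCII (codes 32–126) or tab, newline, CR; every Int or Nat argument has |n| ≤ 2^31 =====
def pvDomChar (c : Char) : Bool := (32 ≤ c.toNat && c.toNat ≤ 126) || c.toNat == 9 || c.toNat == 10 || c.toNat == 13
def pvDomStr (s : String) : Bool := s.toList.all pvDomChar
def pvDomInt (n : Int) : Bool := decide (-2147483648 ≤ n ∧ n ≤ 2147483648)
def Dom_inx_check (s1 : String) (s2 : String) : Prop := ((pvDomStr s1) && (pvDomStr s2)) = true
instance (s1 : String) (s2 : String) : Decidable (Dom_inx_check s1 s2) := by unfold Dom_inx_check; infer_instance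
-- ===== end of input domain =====

-- B drops A's integer move-counter: it validates the zipped pairs up front, then finds the
-- first x->o move and verifies the remaining suffix has no further move. Same values, no speed claim.

-- ===== PORT A =====
-- A's index loop over both strings with the running diff counter; early 'return False' = false
def inxLoopA : List Char → List Char → Nat → Bool
  | [], [], diff => diff == 1
  | a :: as, b :: bs, diff =>
    if (a != 'x' && a != 'o') || (b != 'x' && b != 'o') then false
    else inxLoopA as bs (if a != b && a == 'x' then diff + 1 else diff)
  | _, _, _ => false  -- unreachable: called on equal-length lists

def inx_check (s1 : String) (s2 : String) : Bool :=
  -- the 'type(_) != str' guards cannot fire here: both arguments are strings by type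
  if s1.toList.length != s2.toList.length then false
  else inxLoopA s1.toList s2.toList 0

-- ===== PORT B =====
def pvOkPair (p : Char × Char) : Bool :=
  !(p.1 == 'x' || p.1 == 'o') || !(p.2 == 'x' || p.2 == 'o')  -- 'a not in "xo" or b not in "xo"'

def pvMove (p : Char × Char) : Bool := p.1 == 'x' && p.2 == 'o'

-- B's 'for k, (a, b) in enumerate(pairs)' search: the recursion tail is pairs[k+1:]
def inxFindVerify : List (Char × Char) → Bool
  | [] => false
  | p :: rest => if pvMove p then !(rest.any pvMove) else inxFindVerify rest

def inx_check_alt (s1 : String) (s2 : String) : Bool :=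
  if s1.toList.length != s2.toList.length then false
  else if (s1.toList.zip s2.toList).any pvOkPair then false
  else inxFindVerify (s1.toList.zip s2.toList)

-- ===== PRECONDITION & SPEC =====
def Spec_inx_check (s1 : String) (s2 : String) (out : Bool) : Prop := out = inx_check_alt s1 s2
instance (s1 : String) (s2 : String) (out : Bool) : Decidable (Spec_inx_check s1 s2 out) := by unfold Spec_inx_check; infer_instance

-- ===== CLAIM (what is proved, stated in full; the proofs are below) =====
def Claim_equal_inx_check : Prop := ∀ (s1 : String) (s2 : String), Dom_inx_check s1 s2 → Spec_inx_check s1 s2 (inx_check s1 s2)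

-- ===== LEMMAS AND PROOFS =====

-- A's loop, characterised over the zipped pairs: validity of every pair and 'counter reaches 1'
lemma inxLoopA_eq (as bs : List Char) (d : Nat) (h : as.length = bs.length) :
    inxLoopA as bs d =
      (!(as.zip bs).any pvOkPair && (d + (as.zip bs).countP pvMove == 1)) := by
  induction as generalizing bs d with
  | nil => cases bs with
    | nil => simp [inxLoopA]
    | cons b bs => simp at h
  | cons a as ih =>
    cases bs with
    | nil => simp at h
    | cons b bs =>
      simp only [List.length_cons, Nat.succ.injEq] at h
      simp only [inxLoopA, List.zip_cons_cons, List.any_cons, List.countP_cons]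
      by_cases hv : ((a != 'x' && a != 'o') || (b != 'x' && b != 'o')) = true
      · rw [if_pos hv]
        simp only [Bool.or_eq_true, Bool.and_eq_true, bne_iff_ne] at hv
        rcases hv with ⟨h1, h2⟩ | ⟨h1, h2⟩ <;> simp [pvOkPair, h1, h2]
      · rw [if_neg hv, ih _ _ h]
        have hva : a = 'x' ∨ a = 'o' := by
          by_contra hc; push Not at hc; exact hv (by simp [hc.1, hc.2])
        have hvb : b = 'x' ∨ b = 'o' := by
          by_contra hc; push Not at hc; exact hv (by simp [hc.1, hc.2])
        rcases hva with h1 | h1 <;> rcases hvb with h2 | h2 <;> subst h1 <;> subst h2 <;>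
          · simp only [pvOkPair, pvMove]
            simp [Nat.add_comm, Nat.add_left_comm]

-- B's find-then-verify search answers 'exactly one move'
lemma inxFindVerify_eq (ps : List (Char × Char)) :
    inxFindVerify ps = (ps.countP pvMove == 1) := by
  induction ps with
  | nil => simp [inxFindVerify]
  | cons p rest ih =>
    simp only [inxFindVerify, List.countP_cons]
    by_cases hm : pvMove p = true
    · rw [if_pos hm]
      have hiff : rest.any pvMove = false ↔ rest.countP pvMove = 0 := by
        simp [List.any_eq_false, List.countP_eq_zero]
      cases hA : rest.any pvMove with
      | false => simp [hm, hiff.mp hA]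
      | true =>
        have h0 : ¬ rest.countP pvMove = 0 := fun h => by simp [hiff.mpr h] at hA
        cases hcnt : rest.countP pvMove with
        | zero => exact absurd hcnt h0
        | succ n => simp [hm]
    · rw [if_neg hm, ih]
      simp [hm]

-- ===== VERDICT (by name: the statement is the Claim_ definition above) =====
theorem inx_check_spec : Claim_equal_inx_check := by
  intro s1 s2 _
  unfold Spec_inx_check inx_check inx_check_alt
  by_cases hlen : s1.toList.length = s2.toList.length
  · rw [inxLoopA_eq _ _ _ hlen, inxFindVerify_eq]
    by_cases hv : (s1.toList.zip s2.toList).any pvOkPair = true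
    · simp only [hv]
      simp
    · simp only [eq_false_of_ne_true hv]
      simp
  · have h1 : ¬ s1.length = s2.length := by
      simpa [String.length_toList] using hlen
    simp [h1]
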